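-- pv_equiv track=rewrite | github.com/rkechols/KattisAssorted | solved/sjecista.py | sjecista
-- ===== SOURCE A (Python) =====
-- def sjecista(n: int) -> int:
-- 	count = 0
-- 	existing_lines = list()
-- 	for i in range(n):
-- 		for j in range(i + 2, n):
-- 			if i + n - j == 1:
-- 				continue  # outside edges don't intersect with anything
-- 			for other_i, other_j in existing_lines:
-- 				if i == other_i or i == other_j or j == other_i or j == other_j:
-- 					continue  # distinct diagonals that share a vertex can't intersect
-- 				if other_i < i < other_j < j:  # they cross
-- 					count += 1
-- 			existing_lines.append((i, j))
-- 	return count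
-- ===== SOURCE B (Python) =====
-- def sjecista(n: int) -> int:
--     # number of interior intersection points of diagonals of a convex n-gon:
--     # each 4-subset of vertices determines exactly one crossing pair, so C(n, 4)
--     if n < 4:
--         return 0
--     return n * (n - 1) * (n - 2) * (n - 3) // 24
-- ===== Notes on version B (the rewrite author's own statement) =====
-- stated objective: faster
-- what changed: Replaced the triple nested loop that scans all previously seen diagonals for crossings with the closed form C(n,4) = n(n-1)(n-2)(n-3)//24 (each 4-subset of vertices yields exactly one crossing pair), guarded by n < 4 -> 0.
import Mathlib
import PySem

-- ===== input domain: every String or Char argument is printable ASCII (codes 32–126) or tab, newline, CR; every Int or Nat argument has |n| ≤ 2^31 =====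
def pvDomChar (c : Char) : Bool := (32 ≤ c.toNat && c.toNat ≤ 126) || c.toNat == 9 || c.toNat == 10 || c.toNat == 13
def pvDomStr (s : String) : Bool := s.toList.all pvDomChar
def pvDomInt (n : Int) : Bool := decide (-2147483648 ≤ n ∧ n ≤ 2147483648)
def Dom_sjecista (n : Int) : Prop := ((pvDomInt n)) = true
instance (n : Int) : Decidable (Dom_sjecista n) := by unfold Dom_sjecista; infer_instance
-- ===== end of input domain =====

-- B replaces A's triple nested scan over previously seen diagonals with the closed form C(n,4).

-- ===== PORT A =====
-- inner 'for other_i, other_j in existing_lines' loop body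
def pvCross (i j : Int) (c : Int) (p : Int × Int) : Int :=
  if i = p.1 ∨ i = p.2 ∨ j = p.1 ∨ j = p.2 then c
  else if p.1 < i ∧ i < p.2 ∧ p.2 < j then c + 1 else c

-- body of the 'for j in range(i+2, n)' loop (state = (count, existing_lines))
def pvStepJ (n i : Int) (st : Int × List (Int × Int)) (j : Int) : Int × List (Int × Int) :=
  if i + n - j = 1 then st
  else (st.2.foldl (pvCross i j) st.1, st.2 ++ [(i, j)])

-- body of the 'for i in range(n)' loop
def pvStepI (n : Int) (st : Int × List (Int × Int)) (i : Int) : Int × List (Int × Int) :=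
  (PySem.List.pyRange (i + 2) n 1).foldl (pvStepJ n i) st

def sjecista (n : Int) : Int :=
  ((PySem.List.pyRange 0 n 1).foldl (pvStepI n) (0, [])).1

-- ===== PORT B =====
def sjecista_alt (n : Int) : Int :=
  if n < 4 then 0 else PySem.Int.floordiv (n * (n - 1) * (n - 2) * (n - 3)) 24

-- ===== PRECONDITION & SPEC =====
def Spec_sjecista (n : Int) (out : Int) : Prop := out = sjecista_alt n
instance (n : Int) (out : Int) : Decidable (Spec_sjecista n out) := by unfold Spec_sjecista; infer_instance

-- ===== CLAIM (what is proved, stated in full; the proofs are below) =====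
def Claim_equal_sjecista : Prop := ∀ (n : Int), Dom_sjecista n → Spec_sjecista n (sjecista n)

-- ===== LEMMAS AND PROOFS =====

-- per-pair increment of A's innermost loop
def pvInc (i j : Int) (p : Int × Int) : Int :=
  if i = p.1 ∨ i = p.2 ∨ j = p.1 ∨ j = p.2 then 0
  else if p.1 < i ∧ i < p.2 ∧ p.2 < j then 1 else 0

-- lines appended for outer index i while the inner index has run over [i+2, jhi)
def pvPart (n i jhi : Int) : List (Int × Int) :=
  ((PySem.List.pyRange (i + 2) jhi 1).filter (fun j => decide (¬ (i + n - j = 1)))).map (fun j => (i, j))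

-- existing_lines after k full outer iterations
def pvPrev (n : Int) : Nat → List (Int × Int)
  | 0 => []
  | k + 1 => pvPrev n k ++ pvPart n (k : Int) n

theorem pvStepJ_skip (n i j : Int) (st : Int × List (Int × Int)) (h : i + n - j = 1) :
    pvStepJ n i st j = st := by
  simp [pvStepJ, h]

theorem pvStepJ_keep (n i j : Int) (st : Int × List (Int × Int)) (h : ¬ (i + n - j = 1)) :
    pvStepJ n i st j = (st.2.foldl (pvCross i j) st.1, st.2 ++ [(i, j)]) := by
  simp [pvStepJ, h]

theorem pvCross_eq (i j c : Int) (p : Int × Int) : pvCross i j c p = c + pvInc i j p := by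
  unfold pvCross pvInc; split_ifs <;> ring

theorem foldl_pvCross (i j c : Int) (L : List (Int × Int)) :
    L.foldl (pvCross i j) c = c + (L.map (pvInc i j)).sum := by
  rw [show pvCross i j = fun acc p => acc + pvInc i j p from
    funext fun c => funext fun p => pvCross_eq i j c p]
  exact PySem.List.foldl_add L (pvInc i j) c

theorem sum_ind (hi lo' hi' : Int) : ∀ (t : Nat) (lo : Int), (hi - lo).toNat = t →
    ((PySem.List.pyRange lo hi 1).map (fun x => if lo' ≤ x ∧ x < hi' then (1 : Int) else 0)).sum
      = max 0 (min hi hi' - max lo lo') := by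
  intro t
  induction t with
  | zero =>
    intro lo h
    rw [PySem.List.pyRange_one_eq_nil (by omega)]
    simp; omega
  | succ k ih =>
    intro lo h
    rw [PySem.List.pyRange_one_cons (by omega)]
    simp only [List.map_cons, List.sum_cons]
    rw [ih (lo + 1) (by omega)]
    split_ifs with h1 <;> omega

theorem filter_sum_eq {α : Type} (p : α → Bool) (f : α → Int) (L : List α)
    (h : ∀ x ∈ L, p x = false → f x = 0) :
    ((L.filter p).map f).sum = (L.map f).sum := by
  induction L with
  | nil => rfl
  | cons a L ih =>
    by_cases hp : p a = true
    · simp [hp, ih fun x hx => h x (List.mem_cons_of_mem a hx)]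
    · have h0 := h a (List.mem_cons_self ..) (by simpa using hp)
      simp [hp, h0, ih fun x hx => h x (List.mem_cons_of_mem a hx)]

theorem pvInc_lower (i j a x : Int) (ha : a < i) (hij : i < j) :
    pvInc i j (a, x) = if i + 1 ≤ x ∧ x < j then (1 : Int) else 0 := by
  unfold pvInc; split_ifs <;> omega

theorem sum_inc_part (n a i j : Int) (ha0 : 0 ≤ a) (hai : a < i) (hij : i < j) (hjn : j < n) :
    ((pvPart n a n).map (pvInc i j)).sum = j - i - 1 := by
  unfold pvPart
  rw [List.map_map]
  have hmap : ((PySem.List.pyRange (a + 2) n 1).filter (fun x => decide (¬ (a + n - x = 1)))).map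
      (pvInc i j ∘ fun x => (a, x))
      = ((PySem.List.pyRange (a + 2) n 1).filter (fun x => decide (¬ (a + n - x = 1)))).map
      (fun x => if i + 1 ≤ x ∧ x < j then (1 : Int) else 0) := by
    apply List.map_congr_left
    intro x _
    exact pvInc_lower i j a x hai hij
  rw [hmap, filter_sum_eq]
  · rw [sum_ind n (i + 1) j (n - (a + 2)).toNat (a + 2) rfl]
    omega
  · intro x hx hfalse
    rw [PySem.List.mem_pyRange_one] at hx
    simp only [decide_eq_false_iff_not, Decidable.not_not] at hfalse
    split_ifs with h1
    · omega
    · rfl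

theorem sum_inc_self (n i j jhi : Int) : ((pvPart n i jhi).map (pvInc i j)).sum = 0 := by
  unfold pvPart
  rw [List.map_map]
  have h : (pvInc i j ∘ fun x => (i, x)) = fun (_ : Int) => (0 : Int) := by
    funext x; simp [pvInc]
  simp [h]

theorem sum_inc_prev (n i j : Int) (hij : i < j) (hjn : j < n) :
    ∀ (k : Nat), (k : Int) ≤ i → ((pvPrev n k).map (pvInc i j)).sum = k * (j - i - 1) := by
  intro k
  induction k with
  | zero => intro _; simp [pvPrev]
  | succ m ih =>
    intro hk
    have hc : ((m : Nat) : Int) < i := by push_cast at hk ⊢; omega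
    unfold pvPrev
    rw [List.map_append, List.sum_append, ih (by omega), sum_inc_part n m i j (by positivity) hc hij hjn]
    push_cast; ring

theorem pvPart_empty (n i jhi : Int) (h : jhi ≤ i + 2) : pvPart n i jhi = [] := by
  unfold pvPart
  rw [PySem.List.pyRange_one_eq_nil h]
  rfl

theorem pvPart_extend (n i jlo : Int) (h : i + 2 ≤ jlo) (hkeep : ¬ (i + n - jlo = 1)) :
    pvPart n i (jlo + 1) = pvPart n i jlo ++ [(i, jlo)] := by
  unfold pvPart
  rw [PySem.List.pyRange_one_succ_right h, List.filter_append, List.map_append]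
  simp [hkeep]

theorem pvPart_extend_skip (n i jlo : Int) (h : i + 2 ≤ jlo) (hskip : i + n - jlo = 1) :
    pvPart n i (jlo + 1) = pvPart n i jlo := by
  unfold pvPart
  rw [PySem.List.pyRange_one_succ_right h, List.filter_append]
  simp [hskip]

theorem foldJ (n i : Int) (hi0 : 0 ≤ i) :
    ∀ (t : Nat) (jlo : Int) (c : Int), i + 2 ≤ jlo → jlo ≤ n → (n - jlo).toNat = t →
    (PySem.List.pyRange jlo n 1).foldl (pvStepJ n i) (c, pvPrev n i.toNat ++ pvPart n i jlo)
      = (c + i * ((PySem.List.pyRange jlo n 1).map (fun j => j - i - 1)).sum,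
         pvPrev n i.toNat ++ pvPart n i n) := by
  intro t
  induction t with
  | zero =>
    intro jlo c h1 h2 h3
    have hjn : jlo = n := by omega
    subst hjn
    rw [PySem.List.pyRange_one_eq_nil le_rfl]
    simp
  | succ k ih =>
    intro jlo c h1 h2 h3
    rw [PySem.List.pyRange_one_cons (by omega)]
    simp only [List.foldl_cons, List.map_cons, List.sum_cons]
    by_cases hskip : i + n - jlo = 1
    · have hi0' : i = 0 := by omega
      rw [pvStepJ_skip n i jlo _ hskip, ← pvPart_extend_skip n i jlo h1 hskip]
      rw [ih (jlo + 1) c (by omega) (by omega) (by omega)]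
      subst hi0'
      simp
    · rw [pvStepJ_keep n i jlo _ hskip]
      have hcount : (pvPrev n i.toNat ++ pvPart n i jlo).foldl (pvCross i jlo) c
          = c + i * (jlo - i - 1) := by
        rw [foldl_pvCross, List.map_append, List.sum_append,
            sum_inc_prev n i jlo (by omega) (by omega) i.toNat (by omega),
            sum_inc_self n i jlo jlo]
        rw [Int.toNat_of_nonneg hi0]
        ring
      have hl : (pvPrev n i.toNat ++ pvPart n i jlo) ++ [(i, jlo)]
          = pvPrev n i.toNat ++ pvPart n i (jlo + 1) := by
        rw [pvPart_extend n i jlo h1 hskip, List.append_assoc]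
      dsimp only
      rw [hcount, hl]
      rw [ih (jlo + 1) (c + i * (jlo - i - 1)) (by omega) (by omega) (by omega)]
      congr 1
      ring

theorem foldI (n : Int) :
    ∀ (t : Nat) (ilo c : Int), 0 ≤ ilo → ilo ≤ n → (n - ilo).toNat = t →
    (PySem.List.pyRange ilo n 1).foldl (pvStepI n) (c, pvPrev n ilo.toNat)
      = (c + ((PySem.List.pyRange ilo n 1).map
            (fun i => i * ((PySem.List.pyRange (i + 2) n 1).map (fun j => j - i - 1)).sum)).sum,
         pvPrev n n.toNat) := by
  intro t
  induction t with
  | zero =>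
    intro ilo c h0 h1 h2
    have : ilo = n := by omega
    subst this
    rw [PySem.List.pyRange_one_eq_nil le_rfl]
    simp
  | succ k ih =>
    intro ilo c h0 h1 h2
    rw [PySem.List.pyRange_one_cons (by omega)]
    simp only [List.foldl_cons, List.map_cons, List.sum_cons]
    have hprev : pvPrev n ilo.toNat ++ pvPart n ilo n = pvPrev n (ilo + 1).toNat := by
      have he : (ilo + 1).toNat = ilo.toNat + 1 := by omega
      rw [he]
      show _ = pvPrev n ilo.toNat ++ pvPart n ((ilo.toNat : Nat) : Int) n
      rw [Int.toNat_of_nonneg h0]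
    by_cases hc : ilo + 2 ≤ n
    · have hstart : pvPrev n ilo.toNat = pvPrev n ilo.toNat ++ pvPart n ilo (ilo + 2) := by
        rw [pvPart_empty n ilo (ilo + 2) le_rfl, List.append_nil]
      rw [show pvStepI n (c, pvPrev n ilo.toNat) ilo
            = (PySem.List.pyRange (ilo + 2) n 1).foldl (pvStepJ n ilo) (c, pvPrev n ilo.toNat) from rfl]
      rw [hstart, foldJ n ilo h0 (n - (ilo + 2)).toNat (ilo + 2) c le_rfl hc rfl, hprev]
      rw [ih (ilo + 1) _ (by omega) (by omega) (by omega)]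
      congr 1
      ring
    · have hnil : PySem.List.pyRange (ilo + 2) n 1 = [] :=
        PySem.List.pyRange_one_eq_nil (by omega)
      rw [show pvStepI n (c, pvPrev n ilo.toNat) ilo
            = (PySem.List.pyRange (ilo + 2) n 1).foldl (pvStepJ n ilo) (c, pvPrev n ilo.toNat) from rfl]
      rw [hnil, List.foldl_nil]
      rw [show pvPrev n ilo.toNat = pvPrev n (ilo + 1).toNat from by
        rw [← hprev, pvPart_empty n ilo n (by omega), List.append_nil]]
      rw [ih (ilo + 1) c (by omega) (by omega) (by omega)]
      simp

theorem sjecista_eq_sum (n : Int) (hn : 0 ≤ n) :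
    sjecista n = ((PySem.List.pyRange 0 n 1).map
      (fun i => i * ((PySem.List.pyRange (i + 2) n 1).map (fun j => j - i - 1)).sum)).sum := by
  unfold sjecista
  rw [show ((0 : Int), ([] : List (Int × Int))) = ((0 : Int), pvPrev n (0 : Int).toNat) from rfl]
  rw [foldI n n.toNat 0 0 le_rfl hn (by omega)]
  simp

theorem gauss (c : Int) : ∀ (t : Nat) (lo hi : Int), lo ≤ hi → (hi - lo).toNat = t →
    2 * ((PySem.List.pyRange lo hi 1).map (fun j => j - c)).sum
      = (hi - c) * (hi - c - 1) - (lo - c) * (lo - c - 1) := by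
  intro t
  induction t with
  | zero =>
    intro lo hi h1 h2
    have : lo = hi := by omega
    subst this
    rw [PySem.List.pyRange_one_eq_nil le_rfl]
    simp
  | succ k ih =>
    intro lo hi h1 h2
    rw [PySem.List.pyRange_one_cons (by omega)]
    simp only [List.map_cons, List.sum_cons]
    rw [mul_add, ih (lo + 1) hi (by omega) (by omega)]
    ring

theorem sumJ_closed (i n : Int) (h : i < n) :
    2 * ((PySem.List.pyRange (i + 2) n 1).map (fun j => j - i - 1)).sum
      = (n - i - 1) * (n - i - 2) := by
  rw [show (fun j : Int => j - i - 1) = (fun j : Int => j - (i + 1)) from funext fun j => by ring]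
  by_cases hc : i + 2 ≤ n
  · rw [gauss (i + 1) (n - (i + 2)).toNat (i + 2) n hc rfl]
    ring
  · have hn1 : n = i + 1 := by omega
    subst hn1
    rw [PySem.List.pyRange_one_eq_nil (by omega)]
    simp

theorem cubic (c : Int) : ∀ (m : Nat),
    ((PySem.List.pyRange 0 (m : Int) 1).map
        (fun i => 12 * (i * ((c - i - 1) * (c - i - 2))))).sum
      = 6 * (c - 1) * (c - 2) * m * (m - 1) - 2 * (2 * c - 3) * m * (m - 1) * (2 * m - 1)
        + 3 * m * m * (m - 1) * (m - 1) := by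
  intro m
  induction m with
  | zero =>
    rw [show ((0 : Nat) : Int) = 0 from rfl, PySem.List.pyRange_one_eq_nil le_rfl]
    norm_num
  | succ m ih =>
    rw [show ((m + 1 : Nat) : Int) = (m : Int) + 1 from by push_cast; ring]
    rw [PySem.List.pyRange_one_succ_right (by positivity)]
    rw [List.map_append, List.sum_append, ih]
    simp only [List.map_cons, List.map_nil, List.sum_cons, List.sum_nil]
    ring

theorem count_closed (n : Int) (hn : 0 ≤ n) :
    24 * sjecista n = n * (n - 1) * (n - 2) * (n - 3) := by
  rw [sjecista_eq_sum n hn, ← List.sum_map_mul_left]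
  have hpt : (PySem.List.pyRange 0 n 1).map
      (fun i => 24 * (i * ((PySem.List.pyRange (i + 2) n 1).map (fun j => j - i - 1)).sum))
      = (PySem.List.pyRange 0 n 1).map (fun i => 12 * (i * ((n - i - 1) * (n - i - 2)))) := by
    apply List.map_congr_left
    intro i hi
    rw [PySem.List.mem_pyRange_one] at hi
    have h2 := sumJ_closed i n hi.2
    calc 24 * (i * ((PySem.List.pyRange (i + 2) n 1).map (fun j => j - i - 1)).sum)
        = 12 * (i * (2 * ((PySem.List.pyRange (i + 2) n 1).map (fun j => j - i - 1)).sum)) := by ring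
      _ = 12 * (i * ((n - i - 1) * (n - i - 2))) := by rw [h2]
  rw [hpt]
  rw [show n = ((n.toNat : Nat) : Int) from (Int.toNat_of_nonneg hn).symm]
  rw [cubic ((n.toNat : Nat) : Int) n.toNat]
  ring

-- ===== VERDICT (by name: the statement is the Claim_ definition above) =====
theorem sjecista_spec : Claim_equal_sjecista := by
  intro n _
  unfold Spec_sjecista sjecista_alt
  by_cases hn : n < 0
  · rw [if_pos (by omega : n < 4)]
    unfold sjecista
    rw [PySem.List.pyRange_one_eq_nil (by omega)]
    rfl
  · have hn' : 0 ≤ n := by omega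
    have key := count_closed n hn'
    by_cases h4 : n < 4
    · rw [if_pos h4]
      have hcase : n = 0 ∨ n = 1 ∨ n = 2 ∨ n = 3 := by omega
      rcases hcase with h | h | h | h <;> subst h <;> norm_num at key <;> omega
    · rw [if_neg h4, ← key, PySem.Int.floordiv_eq_ediv_of_pos (by norm_num),
          Int.mul_ediv_cancel_left _ (by norm_num)]
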